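-- pv_equiv track=rewrite | github.com/alexanderustinov/2023-bi-python-2 | 4/parfenov_gs/main.py | padovan_numbers
-- ===== SOURCE A (Python) =====
-- def padovan_numbers(n):
--     first_numbers = [1, 1, 1]
--     if n == 0 or n == 1 or n == 2:
--         return first_numbers
--     else:
--         for i in range(n-1):
--             first_numbers.append(first_numbers[-2] + first_numbers[-3])
--         return first_numbers
-- ===== SOURCE B (Python) =====
-- def pad(k, memo):
--     if k < 3:
--         return 1
--     if k not in memo:
--         memo[k] = pad(k - 2, memo) + pad(k - 3, memo)
--     return memo[k]
--
--
-- def padovan_numbers(n):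
--     if n < 3:
--         return [1, 1, 1]
--     memo = {}
--     return [pad(k, memo) for k in range(n + 2)]
-- ===== Notes on version B (the rewrite author's own statement) =====
-- stated objective: alternative
-- what changed: Replaces A's iterative accumulation that appends first_numbers[-2]+first_numbers[-3] to a growing list with a memoized top-down recursive helper pad(k) over the index, the list being a comprehension [pad(k) for k in range(n+2)].
import Mathlib
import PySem

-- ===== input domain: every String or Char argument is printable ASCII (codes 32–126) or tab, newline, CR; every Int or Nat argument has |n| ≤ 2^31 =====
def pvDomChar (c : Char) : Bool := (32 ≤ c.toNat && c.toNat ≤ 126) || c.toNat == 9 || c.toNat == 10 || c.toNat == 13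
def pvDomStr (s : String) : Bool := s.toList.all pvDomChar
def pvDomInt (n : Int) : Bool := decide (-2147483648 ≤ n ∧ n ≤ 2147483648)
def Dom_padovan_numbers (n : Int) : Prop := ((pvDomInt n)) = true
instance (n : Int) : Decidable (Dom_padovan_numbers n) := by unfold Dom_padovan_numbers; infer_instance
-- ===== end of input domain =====

-- B replaces A's iterative list accumulation with a memoized recursive helper over the index (alternative decomposition, same cost).

-- ===== PORT A =====
def padovan_numbers (n : Int) : List Int :=
  let first_numbers : List Int := [1, 1, 1]
  if n = 0 ∨ n = 1 ∨ n = 2 then first_numbers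
  else
    (PySem.List.pyRange 0 (n - 1) 1).foldl
      (fun acc _ =>
        acc ++ [PySem.List.pyGetD acc (-2) 0 + PySem.List.pyGetD acc (-3) 0])
      first_numbers

-- ===== PORT B =====
-- pad(k, memo): memoized recursion; returns the value and the updated memo dict.
def padB (k : Int) (memo : PySem.Dict Int Int) : Int × PySem.Dict Int Int :=
  if k < 3 then (1, memo)
  else
    match memo.get? k with
    | some v => (v, memo)
    | none =>
      let p2 := padB (k - 2) memo
      let p3 := padB (k - 3) p2.2
      let v := p2.1 + p3.1
      (v, (p3.2).insert k v)
termination_by k.toNat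
decreasing_by all_goals omega

-- [pad(k) for k in range(n + 2)], threading the mutable memo through the fold
def padovan_numbers_alt (n : Int) : List Int :=
  if n < 3 then [1, 1, 1]
  else
    ((PySem.List.pyRange 0 (n + 2) 1).foldl
      (fun (st : List Int × PySem.Dict Int Int) k =>
        let r := padB k st.2
        (st.1 ++ [r.1], r.2))
      ([], PySem.Dict.empty)).1

-- ===== PRECONDITION & SPEC =====
def Spec_padovan_numbers (n : Int) (out : List Int) : Prop := out = padovan_numbers_alt n
instance (n : Int) (out : List Int) : Decidable (Spec_padovan_numbers n out) := by unfold Spec_padovan_numbers; infer_instance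

-- ===== CLAIM (what is proved, stated in full; the proofs are below) =====
def Claim_equal_padovan_numbers : Prop := ∀ (n : Int), Dom_padovan_numbers n → Spec_padovan_numbers n (padovan_numbers n)

-- ===== LEMMAS AND PROOFS =====

-- the Padovan sequence as a pure function (proof reference only)
def P : Nat → Int
  | 0 => 1
  | 1 => 1
  | 2 => 1
  | (k + 3) => P (k + 1) + P k

theorem P_lt3 {j : Nat} (h : j < 3) : P j = 1 := by
  interval_cases j <;> rfl

-- every memo entry is a correct Padovan value at a nonnegative index
def MemoInv (memo : PySem.Dict Int Int) : Prop :=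
  ∀ i v, memo.get? i = some v → ∃ j : Nat, i = (j : Int) ∧ v = P j

theorem MemoInv_empty : MemoInv PySem.Dict.empty := by
  intro i v h
  simp [PySem.Dict.get?_empty] at h

theorem MemoInv_insert {memo : PySem.Dict Int Int} (h : MemoInv memo) (j : Nat)
    (v : Int) (hv : v = P j) : MemoInv (memo.insert (j : Int) v) := by
  intro i w hw
  rw [PySem.Dict.get?_insert] at hw
  split at hw
  · next heq => cases hw; exact ⟨j, heq, hv⟩
  · exact h i w hw

theorem padB_correct : ∀ (m : Nat) (k : Int), k.toNat = m → 0 ≤ k →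
    ∀ memo, MemoInv memo → (padB k memo).1 = P k.toNat ∧ MemoInv (padB k memo).2 := by
  intro m
  induction m using Nat.strong_induction_on with
  | _ m ih =>
    intro k hm hk memo hinv
    rw [padB]
    by_cases h3 : k < 3
    · simp only [if_pos h3]
      exact ⟨(P_lt3 (by omega)).symm, hinv⟩
    · simp only [if_neg h3]
      cases hget : memo.get? k with
      | some v =>
        simp only
        obtain ⟨j, hj, hv⟩ := hinv k v hget
        refine ⟨?_, hinv⟩
        subst hv; congr 1; omega
      | none =>
        obtain ⟨h2v, h2inv⟩ := ih (k - 2).toNat (by omega) (k - 2) rfl (by omega) memo hinv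
        obtain ⟨h3v, h3inv⟩ := ih (k - 3).toNat (by omega) (k - 3) rfl (by omega) _ h2inv
        have hval : (padB (k - 2) memo).1 + (padB (k - 3) (padB (k - 2) memo).2).1
            = P k.toNat := by
          rw [h2v, h3v]
          have hk3 : k.toNat = (k.toNat - 3) + 3 := by omega
          rw [hk3, P]
          congr 1 <;> congr 1 <;> omega
        refine ⟨hval, ?_⟩
        have hcast : ((k.toNat : Int)) = k := by omega
        have h' := MemoInv_insert h3inv k.toNat _ hval
        rw [hcast] at h'
        exact h' 

-- the A-side loop, run over any index list, extends the table of Padovan values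
theorem Aloop (l : List Int) : ∀ (j : Nat), 3 ≤ j →
    l.foldl
      (fun acc _ =>
        acc ++ [PySem.List.pyGetD acc (-2) 0 + PySem.List.pyGetD acc (-3) 0])
      ((List.range j).map P)
    = (List.range (j + l.length)).map P := by
  induction l with
  | nil => intro j _; simp
  | cons x xs ih =>
    intro j hj
    simp only [List.foldl_cons]
    have hlen : ((List.range j).map P).length = j := by simp
    have e2 : PySem.List.pyGetD ((List.range j).map P) (-2) 0 = P (j - 2) := by
      rw [PySem.List.pyGetD_neg_ofNat _ 2 0 (by omega) (by simp only [hlen]; omega)]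
      simp [hlen]
    have e3 : PySem.List.pyGetD ((List.range j).map P) (-3) 0 = P (j - 3) := by
      rw [PySem.List.pyGetD_neg_ofNat _ 3 0 (by omega) (by simp only [hlen]; omega)]
      simp [hlen]
    have estep : (List.range j).map P ++ [PySem.List.pyGetD ((List.range j).map P) (-2) 0
        + PySem.List.pyGetD ((List.range j).map P) (-3) 0]
        = (List.range (j + 1)).map P := by
      rw [e2, e3, List.range_succ, List.map_append, List.map_singleton]
      congr 2
      have hj3 : j = (j - 3) + 3 := by omega
      rw [hj3, P]
      have h2 : j - 3 + 3 - 2 = j - 3 + 1 := by omega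
      have h3 : j - 3 + 3 - 3 = j - 3 := by omega
      rw [h2, h3]
    rw [estep, ih (j + 1) (by omega)]
    congr 2
    simp only [List.length_cons]
    omega

-- the B-side fold maps pad over the indices
theorem Bloop : ∀ (ks : List Int), (∀ k ∈ ks, 0 ≤ k) →
    ∀ (acc : List Int) (memo : PySem.Dict Int Int), MemoInv memo →
    (ks.foldl
      (fun (st : List Int × PySem.Dict Int Int) k =>
        let r := padB k st.2
        (st.1 ++ [r.1], r.2))
      (acc, memo)).1 = acc ++ ks.map (fun k => P k.toNat) := by
  intro ks
  induction ks with
  | nil => intro _ acc memo _; simp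
  | cons x xs ih =>
    intro hpos acc memo hinv
    simp only [List.foldl_cons, List.map_cons]
    obtain ⟨hv, hinv'⟩ := padB_correct x.toNat x rfl (hpos x (by simp)) memo hinv
    rw [ih (fun k hk => hpos k (by simp [hk])) _ _ hinv', hv]
    simp

theorem padovan_numbers_eq (n : Int) :
    padovan_numbers n = padovan_numbers_alt n := by
  by_cases hsmall : n < 3
  · unfold padovan_numbers padovan_numbers_alt
    rw [if_pos hsmall]
    by_cases h012 : n = 0 ∨ n = 1 ∨ n = 2
    · simp [h012]
    · rw [if_neg h012, PySem.List.pyRange_one_eq_nil (by omega)]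
      rfl
  · unfold padovan_numbers padovan_numbers_alt
    rw [if_neg hsmall, if_neg (by omega)]
    have hA : ([1, 1, 1] : List Int) = (List.range 3).map P := by decide
    simp only [hA]
    rw [Aloop _ 3 (by omega)]
    rw [Bloop _ (fun k hk => ((PySem.List.mem_pyRange_one).1 hk).1) [] _ MemoInv_empty]
    simp only [PySem.List.pyRange_one, List.map_map, List.length_map, List.length_range,
      List.nil_append]
    have hlen : 3 + (n - 1 - 0).toNat = (n + 2 - 0).toNat := by omega
    rw [hlen]
    apply List.map_congr_left
    intro k _
    simp

-- ===== VERDICT (by name: the statement is the Claim_ definition above) =====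
theorem padovan_numbers_spec : Claim_equal_padovan_numbers := by
  intro n _
  unfold Spec_padovan_numbers
  exact padovan_numbers_eq n
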